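-- pv_equiv track=rewrite | github.com/alexrangel001/Advent_of_Code_Challenges | Day 5/day5.py | condition_one
-- ===== SOURCE A (Python) =====
-- def condition_one(line):
--
--     # Initialize vowel counter
--     vowel_count = 0
--
--     # Access individual characters and test the condition
--     for ch in line:
--         if ch == 'a' or ch == 'e' or ch == 'i' or ch == 'o' or ch == 'u':
--             vowel_count += 1
--
--     # Are there at least three vowels?
--     if vowel_count >= 3:
--         return True
--     else:
--         return False
-- ===== SOURCE B (Python) =====
-- def condition_one(line):
--     # Vowel total as a sum of five per-vowel scans instead of one char loop.
--     return sum(line.count(v) for v in 'aeiou') >= 3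
-- ===== Notes on version B (the rewrite author's own statement) =====
-- stated objective: faster
-- what changed: Replaces the single Python-level character loop with or-chain tests by five full str.count scans (one per vowel) summed, then a direct >= 3 comparison.
import Mathlib
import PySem

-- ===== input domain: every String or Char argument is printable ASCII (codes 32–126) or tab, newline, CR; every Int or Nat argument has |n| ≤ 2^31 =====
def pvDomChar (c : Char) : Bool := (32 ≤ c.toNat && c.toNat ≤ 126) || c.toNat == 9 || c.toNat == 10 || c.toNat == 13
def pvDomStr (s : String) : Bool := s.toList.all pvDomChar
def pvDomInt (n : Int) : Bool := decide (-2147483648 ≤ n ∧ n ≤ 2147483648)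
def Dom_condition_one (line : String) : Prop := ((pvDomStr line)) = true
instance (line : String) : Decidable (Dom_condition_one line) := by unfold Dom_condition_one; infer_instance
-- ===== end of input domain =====

-- B computes the vowel total as a sum of five per-vowel str.count scans instead of A's single character loop (measured faster in Python: C-level scans vs an interpreted loop).


-- ===== PORT A =====
-- single pass: for ch in line: if ch == 'a' or … : vowel_count += 1; then vowel_count >= 3
def condition_one (line : String) : Bool :=
  let vowel_count : Int := line.toList.foldl
    (fun n ch => if ch == 'a' || ch == 'e' || ch == 'i' || ch == 'o' || ch == 'u' then n + 1 else n) 0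
  if vowel_count ≥ 3 then true else false

-- ===== PORT B =====
-- sum(line.count(v) for v in 'aeiou') >= 3
def condition_one_alt (line : String) : Bool :=
  decide (("aeiou".toList.map (fun v => (PySem.Str.count line (String.ofList [v]) : Int))).sum ≥ 3)

-- ===== PRECONDITION & SPEC =====
def Spec_condition_one (line : String) (out : Bool) : Prop := out = condition_one_alt line
instance (line : String) (out : Bool) : Decidable (Spec_condition_one line out) := by unfold Spec_condition_one; infer_instance

-- ===== CLAIM (what is proved, stated in full; the proofs are below) =====
def Claim_equal_condition_one : Prop := ∀ (line : String), Dom_condition_one line → Spec_condition_one line (condition_one line)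

-- ===== LEMMAS AND PROOFS =====

-- counting a single-character substring is List.count
lemma chars_count_go_singleton (c : Char) (fuel : Nat) (l : List Char) (acc : Nat)
    (h : l.length ≤ fuel) : PySem.Chars.count.go [c] fuel l acc = acc + l.count c := by
  induction fuel generalizing l acc with
  | zero =>
    cases l with
    | nil => simp [PySem.Chars.count.go]
    | cons x t => simp at h
  | succ n ih =>
    cases l with
    | nil => simp [PySem.Chars.count.go]
    | cons x t =>
      simp only [PySem.Chars.count.go, List.isPrefixOf]
      by_cases hx : c = x
      · subst hx
        simp only [beq_self_eq_true, Bool.true_and, if_pos, List.length_singleton, List.drop_succ_cons, List.drop_zero, List.count_cons_self]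
        rw [ih t (acc + 1) (by simp at h; omega)]
        omega
      · have hb : (c == x) = false := by simp [hx]
        simp only [hb, Bool.false_and, if_neg, Bool.false_eq_true, not_false_iff]
        rw [ih t acc (by simp at h; omega), List.count_cons]
        simp [Ne.symm hx]

lemma chars_count_singleton (s : List Char) (c : Char) :
    PySem.Chars.count s [c] = s.count c := by
  simp only [PySem.Chars.count, List.isEmpty_cons, Bool.false_eq_true, if_false]
  rw [chars_count_go_singleton c s.length s 0 (le_refl _), Nat.zero_add]

-- the or-chain countP splits into five per-vowel counts
lemma countP_vowels (l : List Char) :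
    l.countP (fun ch => ch == 'a' || ch == 'e' || ch == 'i' || ch == 'o' || ch == 'u')
      = l.count 'a' + l.count 'e' + l.count 'i' + l.count 'o' + l.count 'u' := by
  induction l with
  | nil => simp
  | cons x t ih =>
    simp only [List.countP_cons, List.count_cons, ih, beq_iff_eq]
    split_ifs <;> simp_all <;> omega

theorem condition_one_spec : Claim_equal_condition_one := by
  intro line _
  unfold Spec_condition_one condition_one condition_one_alt
  have hb : ∀ s : String, ∀ c : Char, PySem.Str.count s (String.ofList [c]) = s.toList.count c := by
    intro s c
    rw [PySem.Str.count_eq]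
    rw [show (String.ofList [c]).toList = [c] by simp, chars_count_singleton s.toList c]
  rw [PySem.List.foldl_ite_add_one]
  simp only [hb]
  have hl : "aeiou".toList = ['a', 'e', 'i', 'o', 'u'] := rfl
  rw [hl]
  simp only [List.map_cons, List.map_nil, List.sum_cons, List.sum_nil, add_zero, zero_add,
    Bool.decide_eq_true]
  rw [countP_vowels]
  split_ifs with h
  · exact (decide_eq_true (by push_cast at h ⊢; omega)).symm
  · exact (decide_eq_false (by push_cast at h ⊢; omega)).symm
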